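-- pv_equiv track=rewrite | github.com/LifeTakerSimo/MathAlgorithm | main.py | numberOfUse
-- ===== SOURCE A (Python) =====
-- def numberOfUse(L):
--     occurrences = {}
--     for i in L:
--         if i==0:
--             continue
--         else:
--             if i in occurrences:
--                 occurrences[i] += 1
--             else:
--                 occurrences[i] = 1
--     return(occurrences)
-- ===== SOURCE B (Python) =====
-- def numberOfUse(L):
--     # distinct values in first-occurrence order, then one counting scan per value
--     return {v: L.count(v) for v in dict.fromkeys(L) if v != 0}
-- ===== Notes on version B (the rewrite author's own statement) =====
-- stated objective: alternative
-- what changed: Replaces the single accumulating dict pass with a build-distinct-values-first (dict.fromkeys) then count-per-value rescan strategy.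
import Mathlib
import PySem

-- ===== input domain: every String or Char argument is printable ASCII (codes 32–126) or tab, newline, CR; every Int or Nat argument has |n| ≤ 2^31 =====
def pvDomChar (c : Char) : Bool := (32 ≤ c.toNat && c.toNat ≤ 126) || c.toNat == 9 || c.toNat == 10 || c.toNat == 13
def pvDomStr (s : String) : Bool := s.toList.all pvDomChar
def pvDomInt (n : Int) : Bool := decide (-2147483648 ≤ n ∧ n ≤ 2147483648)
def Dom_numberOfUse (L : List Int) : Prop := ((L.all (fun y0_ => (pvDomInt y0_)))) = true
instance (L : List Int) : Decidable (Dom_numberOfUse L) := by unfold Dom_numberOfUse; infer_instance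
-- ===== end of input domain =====

-- B counts occurrences of nonzero elements by deduplicating first and rescanning per value,
-- instead of A's single accumulating dict pass; return value only, no mutation. Objective: alternative.

-- ===== PORT A =====
-- one accumulating dict pass; 'continue' on zero, membership test then += 1 / = 1
def numberOfUse (L : List Int) : List (Int × Int) :=
  (L.foldl (fun occurrences i =>
      if i == 0 then occurrences
      else if occurrences.contains i then occurrences.modify i 0 (· + 1)
      else occurrences.insert i 1)
    PySem.Dict.empty).items

-- ===== PORT B =====
-- {v: L.count(v) for v in dict.fromkeys(L) if v != 0}
def numberOfUse_alt (L : List Int) : List (Int × Int) :=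
  ((PySem.List.dedup L).filter (fun v => !(v == 0))).map
    (fun v => (v, (PySem.List.count L v : Int)))

-- ===== PRECONDITION & SPEC =====
def Spec_numberOfUse (L : List Int) (out : List (Int × Int)) : Prop := out = numberOfUse_alt L
instance (L : List Int) (out : List (Int × Int)) : Decidable (Spec_numberOfUse L out) := by unfold Spec_numberOfUse; infer_instance

-- ===== CLAIM (what is proved, stated in full; the proofs are below) =====
def Claim_equal_numberOfUse : Prop := ∀ (L : List Int), Dom_numberOfUse L → Spec_numberOfUse L (numberOfUse L)

-- ===== LEMMAS AND PROOFS =====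

-- A's loop body, when i ≠ 0, is exactly the Counter step
theorem step_eq (d : PySem.Dict Int Int) (i : Int) :
    (if d.contains i then d.modify i 0 (· + 1) else d.insert i 1) = d.modify i 0 (· + 1) := by
  by_cases h : d.contains i
  · simp [h]
  · simp only [Bool.not_eq_true] at h
    simp [PySem.Dict.modify, PySem.Dict.getD_of_not_contains, h]

-- A's fold is the Counter fold over the nonzero elements
theorem foldA_eq (L : List Int) : ∀ (d : PySem.Dict Int Int),
    L.foldl (fun occurrences i =>
      if i == 0 then occurrences
      else if occurrences.contains i then occurrences.modify i 0 (· + 1)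
      else occurrences.insert i 1) d
    = (L.filter (fun i => !(i == 0))).foldl (fun d x => d.modify x 0 (· + 1)) d := by
  induction L with
  | nil => intro d; rfl
  | cons x xs ih =>
    intro d
    by_cases hx : x = 0
    · simp only [List.foldl_cons, List.filter_cons]
      simp [hx]
      simpa [step_eq] using ih d
    · simp only [List.foldl_cons, List.filter_cons]
      simp [hx, step_eq]
      simpa [step_eq] using ih _

-- ordered dedup commutes with filter
theorem ofList_filter (p : Int → Bool) (l : List Int) :
    PySem.Set.ofList (l.filter p) = (PySem.Set.ofList l).filter p := by
  induction l with
  | nil => rfl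
  | cons x xs ih =>
    by_cases hx : p x = true
    · rw [List.filter_cons, if_pos hx, PySem.Set.ofList_cons, ih, PySem.Set.ofList_cons,
        List.filter_cons, if_pos hx]
      simp only [PySem.Set.discard, List.filter_filter]
      refine congrArg (x :: ·) (List.filter_congr ?_)
      intro a _; simp [Bool.and_comm]
    · simp only [Bool.not_eq_true] at hx
      rw [List.filter_cons, if_neg (by simp [hx]), ih, PySem.Set.ofList_cons,
        List.filter_cons, if_neg (by simp [hx])]
      simp only [PySem.Set.discard, List.filter_filter]
      refine (List.filter_congr ?_).symm
      intro a _
      by_cases hp : p a = true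
      · have hax : ¬ (a == x) = true := by
          intro h
          have : a = x := by simpa using h
          rw [this] at hp; exact absurd hp (by simp [hx])
        simp [hp, hax]
      · simp only [Bool.not_eq_true] at hp
        simp [hp]

-- ===== VERDICT (by name: the statement is the Claim_ definition above) =====
theorem numberOfUse_spec : Claim_equal_numberOfUse := by
  intro L _
  show numberOfUse L = numberOfUse_alt L
  unfold numberOfUse numberOfUse_alt
  rw [foldA_eq, ← PySem.Dict.counter_eq_foldl, PySem.Dict.items_counter,
    ofList_filter, ← PySem.List.dedup_eq_ofList]
  refine List.map_congr_left ?_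
  intro v hv
  have hv0' : v ≠ 0 := by
    have := (List.mem_filter.mp hv).2
    simpa using this
  rw [PySem.List.count_eq, List.count_filter]
  simp [hv0']
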